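-- pv_equiv track=rewrite | github.com/pjedur/python | Exam/numbers_game.py | numbers_game
-- ===== SOURCE A (Python) =====
-- import itertools as it
--
-- def checklist(s):
--     x = True
--     for i in range(len(s)-1):
--         if s[i]%2 == 0:
--             if s[i+1]%2 != 0 or s[i] == s[i+1]:
--                 continue
--             else:
--                 x = False
--         else:
--             if ((s[i+1]%2 == 0 and s[i+1] > s[i]) or (s[i+1] < s[i] and s[i+1]%2 != 0)):
--                 continue
--             else:
--                 x=False
--     return x
--
-- def numbers_game(s):
--     if len(s) < 2:
--         s = list(*s)
--     for i in s:
--         if i > 100 or i < 1: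
--             return False
--
--     s = list(it.permutations(s))
--     for i in s:
--         if checklist(i) == True:
--             return True
--     return False
-- ===== SOURCE B (Python) =====
-- def _ok(a, b):
--     if a % 2 == 0:
--         return b % 2 != 0 or a == b
--     return (b % 2 == 0 and b > a) or (b < a and b % 2 != 0)
--
-- def numbers_game(s):
--     for i in s:
--         if i > 100 or i < 1:
--             return False
--     if not s:
--         return True
--     def extend(last, rest):
--         if not rest:
--             return True
--         for j in range(len(rest)):
--             if _ok(last, rest[j]) and extend(rest[j], rest[:j] + rest[j+1:]):
--                 return True
--         return False
--     return any(extend(s[j], s[:j] + s[j+1:]) for j in range(len(s)))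
-- ===== Notes on version B (the rewrite author's own statement) =====
-- stated objective: alternative
-- what changed: Replaces A's materialisation and scan of all n! permutations (each re-checked from scratch by checklist) with a recursive backtracking search over the remaining elements that only extends orderings whose newest adjacent pair already satisfies the parity/order rule.
import Mathlib
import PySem

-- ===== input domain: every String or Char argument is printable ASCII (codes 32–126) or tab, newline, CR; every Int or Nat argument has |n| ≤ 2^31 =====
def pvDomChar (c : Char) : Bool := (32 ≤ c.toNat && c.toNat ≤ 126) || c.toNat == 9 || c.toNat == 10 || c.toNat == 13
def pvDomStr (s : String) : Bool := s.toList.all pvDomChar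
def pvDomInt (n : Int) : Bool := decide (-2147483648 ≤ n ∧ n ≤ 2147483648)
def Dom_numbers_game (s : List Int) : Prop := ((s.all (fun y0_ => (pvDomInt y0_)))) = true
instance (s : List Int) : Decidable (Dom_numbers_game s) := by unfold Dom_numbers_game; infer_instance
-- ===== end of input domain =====

-- B replaces A's brute-force scan of all n! permutations by a backtracking search that
-- only extends orderings whose newest adjacent pair already satisfies the rule (objective: alternative).

-- ===== PORT A =====
-- checklist(s): fold over range(len(s)-1); x flips to False on a bad adjacent pair
def pvChecklist (s : List Int) : Bool :=
  (List.range (s.length - 1)).foldl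
    (fun x i =>
      if PySem.Int.mod (s.getD i 0) 2 == 0 then
        if PySem.Int.mod (s.getD (i+1) 0) 2 != 0 || s.getD i 0 == s.getD (i+1) 0 then x
        else false
      else
        if (PySem.Int.mod (s.getD (i+1) 0) 2 == 0 && s.getD (i+1) 0 > s.getD i 0) ||
           (s.getD (i+1) 0 < s.getD i 0 && PySem.Int.mod (s.getD (i+1) 0) 2 != 0) then x
        else false)
    true

def numbers_game (s : List Int) : Bool :=
  -- Python: `if len(s) < 2: s = list(*s)`; on [] this yields [], on a length-1 list of ints
  -- it raises TypeError (excluded by Pre_numbers_game), so the value for len 1 here is irrelevant.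
  let s := if s.length < 2 then [] else s
  if s.any (fun i => i > 100 || i < 1) then false
  else s.permutations.any (fun p => pvChecklist p == true)

-- ===== PORT B =====
def pvOk (a b : Int) : Bool :=
  if PySem.Int.mod a 2 == 0 then PySem.Int.mod b 2 != 0 || a == b
  else (PySem.Int.mod b 2 == 0 && b > a) || (b < a && PySem.Int.mod b 2 != 0)

-- extend(last, rest) of Source B; fuel = len(rest) makes the recursion structural (never exhausted)
def pvExtend (fuel : Nat) (last : Int) (rest : List Int) : Bool :=
  match rest with
  | [] => true
  | _ =>
    match fuel with
    | 0 => false  -- unreachable: always called with fuel ≥ rest.length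
    | fuel + 1 =>
      (List.range rest.length).any fun j =>
        pvOk last (rest.getD j 0) && pvExtend fuel (rest.getD j 0) (rest.take j ++ rest.drop (j+1))

def numbers_game_alt (s : List Int) : Bool :=
  if s.any (fun i => i > 100 || i < 1) then false
  else if s.isEmpty then true
  else (List.range s.length).any fun j =>
    pvExtend (s.length - 1) (s.getD j 0) (s.take j ++ s.drop (j+1))

-- ===== PRECONDITION & SPEC =====
-- Pre_ excludes exactly the length-1 lists: there A's `s = list(*s)` calls list(n) on an int and
-- raises TypeError before anything is returned.
def Pre_numbers_game (s : List Int) : Prop := s.length ≠ 1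
instance (s : List Int) : Decidable (Pre_numbers_game s) := by unfold Pre_numbers_game; infer_instance
def pvWitness_numbers_game : List Int := [2, 3]

def Spec_numbers_game (s : List Int) (out : Bool) : Prop := out = numbers_game_alt s
instance (s : List Int) (out : Bool) : Decidable (Spec_numbers_game s out) := by unfold Spec_numbers_game; infer_instance

-- ===== CLAIM (what is proved, stated in full; the proofs are below) =====
def Claim_equal_numbers_game : Prop := ∀ (s : List Int), Dom_numbers_game s → Pre_numbers_game s → Spec_numbers_game s (numbers_game s)

-- ===== LEMMAS AND PROOFS =====

-- valid adjacent chain, the common specification of both searches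
def pvChain : List Int → Bool
  | [] => true
  | [_] => true
  | a :: b :: t => pvOk a b && pvChain (b :: t)

theorem foldl_guard (c : Nat → Bool) (l : List Nat) (x : Bool) :
    l.foldl (fun x i => if c i then x else false) x = (x && l.all c) := by
  induction l generalizing x with
  | nil => simp
  | cons a t ih => simp only [List.foldl_cons, List.all_cons, ih]
                   cases c a <;> cases x <;> simp

theorem checklist_eq_all (s : List Int) :
    pvChecklist s =
      (List.range (s.length - 1)).all (fun i => pvOk (s.getD i 0) (s.getD (i+1) 0)) := by
  unfold pvChecklist
  have h : (fun (x : Bool) (i : Nat) =>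
      if PySem.Int.mod (s.getD i 0) 2 == 0 then
        if PySem.Int.mod (s.getD (i+1) 0) 2 != 0 || s.getD i 0 == s.getD (i+1) 0 then x
        else false
      else
        if (PySem.Int.mod (s.getD (i+1) 0) 2 == 0 && s.getD (i+1) 0 > s.getD i 0) ||
           (s.getD (i+1) 0 < s.getD i 0 && PySem.Int.mod (s.getD (i+1) 0) 2 != 0) then x
        else false)
      = (fun (x : Bool) (i : Nat) => if pvOk (s.getD i 0) (s.getD (i+1) 0) then x else false) := by
    funext x i
    simp only [pvOk]
    split_ifs <;> rfl
  rw [h, foldl_guard]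
  simp

theorem all_eq_chain (s : List Int) :
    (List.range (s.length - 1)).all (fun i => pvOk (s.getD i 0) (s.getD (i+1) 0)) = pvChain s := by
  match s with
  | [] => rfl
  | [a] => rfl
  | a :: b :: t =>
    have ih := all_eq_chain (b :: t)
    simp only [List.length_cons, Nat.add_sub_cancel] at ih ⊢
    rw [List.range_succ_eq_map]
    simp only [List.all_cons, List.all_map]
    simp only [List.getD_cons_zero, List.getD_cons_succ, Function.comp_def,
      Nat.succ_eq_add_one] at ih ⊢
    rw [ih]
    simp [pvChain]

theorem checklist_eq_chain (s : List Int) : pvChecklist s = pvChain s := by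
  rw [checklist_eq_all, all_eq_chain]

theorem take_drop_eraseIdx (l : List Int) (j : Nat) :
    l.take j ++ l.drop (j+1) = l.eraseIdx j := by
  induction l generalizing j with
  | nil => simp
  | cons a t ih => cases j <;> simp [List.eraseIdx, *]

theorem extend_iff (fuel : Nat) (last : Int) (rest : List Int) (hf : rest.length ≤ fuel) :
    pvExtend fuel last rest = true ↔ ∃ p, rest.Perm p ∧ pvChain (last :: p) = true := by
  induction fuel generalizing last rest with
  | zero =>
    have : rest = [] := List.length_eq_zero_iff.mp (Nat.le_zero.mp hf)
    subst this
    simp only [pvExtend]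
    constructor
    · intro _; exact ⟨[], List.Perm.refl _, rfl⟩
    · intro _; trivial
  | succ f ih =>
    match rest with
    | [] =>
      simp only [pvExtend]
      constructor
      · intro _; exact ⟨[], List.Perm.refl _, rfl⟩
      · intro _; trivial
    | r :: rs =>
      simp only [pvExtend, List.any_eq_true, List.mem_range, Bool.and_eq_true]
      constructor
      · rintro ⟨j, hj, hok, hext⟩
        have hj' : j < (r :: rs).length := hj
        rw [take_drop_eraseIdx] at hext
        have hlen : ((r :: rs).eraseIdx j).length ≤ f := by
          rw [List.length_eraseIdx]
          simp only [hj', if_true]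
          omega
        obtain ⟨p', hperm', hchain'⟩ := (ih _ _ hlen).mp hext
        refine ⟨(r :: rs).getD j 0 :: p', ?_, ?_⟩
        · rw [List.getD_eq_getElem _ _ hj']
          exact (List.getElem_cons_eraseIdx_perm hj').symm.trans (List.Perm.cons _ hperm')
        · simp only [pvChain, Bool.and_eq_true]
          exact ⟨hok, hchain'⟩
      · rintro ⟨p, hperm, hchain⟩
        match p, hperm with
        | [], hperm => exact absurd hperm.eq_nil (by simp)
        | v :: p', hperm =>
          have hv : v ∈ (r :: rs) := hperm.mem_iff.mpr (List.mem_cons_self ..)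
          obtain ⟨j, hj, hgj⟩ := List.getElem_of_mem hv
          have hchain2 := hchain
          simp only [pvChain, Bool.and_eq_true] at hchain2
          refine ⟨j, hj, by rw [List.getD_eq_getElem _ _ hj, hgj]; exact hchain2.1, ?_⟩
          rw [take_drop_eraseIdx]
          have hperm2 : ((r :: rs)[j] :: (r :: rs).eraseIdx j).Perm (v :: p') :=
            (List.getElem_cons_eraseIdx_perm hj).trans hperm
          rw [hgj] at hperm2
          have herase : ((r :: rs).eraseIdx j).Perm p' := hperm2.cons_inv
          have hlen : ((r :: rs).eraseIdx j).length ≤ f := by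
            rw [List.length_eraseIdx]
            simp only [hj, if_true]
            omega
          rw [List.getD_eq_getElem _ _ hj, hgj]
          exact (ih _ _ hlen).mpr ⟨p', herase, hchain2.2⟩

theorem alt_search_iff (s : List Int) (hne : s ≠ []) :
    ((List.range s.length).any fun j =>
        pvExtend (s.length - 1) (s.getD j 0) (s.take j ++ s.drop (j+1))) = true
      ↔ ∃ p, s.Perm p ∧ pvChain p = true := by
  simp only [List.any_eq_true, List.mem_range]
  constructor
  · rintro ⟨j, hj, hext⟩
    rw [take_drop_eraseIdx] at hext
    have hlen : (s.eraseIdx j).length ≤ s.length - 1 := by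
      rw [List.length_eraseIdx, if_pos hj]
    obtain ⟨p', hperm', hchain'⟩ := (extend_iff _ _ _ hlen).mp hext
    refine ⟨s.getD j 0 :: p', ?_, ?_⟩
    · rw [List.getD_eq_getElem _ _ hj]
      exact (List.getElem_cons_eraseIdx_perm hj).symm.trans (List.Perm.cons _ hperm')
    · cases p' <;> simp_all [pvChain]
  · rintro ⟨p, hperm, hchain⟩
    match p with
    | [] => exact absurd (hperm.eq_nil) hne
    | v :: p' =>
      have hv : v ∈ s := hperm.mem_iff.mpr (List.mem_cons_self ..)
      obtain ⟨j, hj, hgj⟩ := List.getElem_of_mem hv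
      refine ⟨j, hj, ?_⟩
      rw [take_drop_eraseIdx]
      have hperm2 := (List.getElem_cons_eraseIdx_perm hj).trans hperm
      rw [hgj] at hperm2
      have herase : (s.eraseIdx j).Perm p' := hperm2.cons_inv
      have hlen : (s.eraseIdx j).length ≤ s.length - 1 := by
        rw [List.length_eraseIdx, if_pos hj]
      rw [List.getD_eq_getElem _ _ hj, hgj]
      refine (extend_iff _ _ _ hlen).mpr ⟨p', herase, ?_⟩
      cases p' <;> simp_all [pvChain]

-- ===== VERDICT (by name: the statement is the Claim_ definition above) =====
theorem numbers_game_spec : Claim_equal_numbers_game := by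
  intro s _ hpre
  unfold Spec_numbers_game
  match s, hpre with
  | [], _ => decide
  | a :: b :: t, _ =>
    unfold numbers_game numbers_game_alt
    have hlen : ¬ ((a :: b :: t).length < 2) := by simp
    simp only [hlen, if_false]
    by_cases hbad : (a :: b :: t).any (fun i => i > 100 || i < 1) = true
    · simp [hbad]
    · rw [Bool.not_eq_true] at hbad
      simp only [hbad, if_false, Bool.false_eq_true, List.isEmpty_cons]
      rw [Bool.eq_iff_iff]
      rw [alt_search_iff _ (by simp)]
      simp only [List.any_eq_true, List.mem_permutations, beq_iff_eq]
      constructor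
      · rintro ⟨p, hp, hc⟩
        exact ⟨p, hp.symm, by rw [← checklist_eq_chain]; exact hc⟩
      · rintro ⟨p, hp, hc⟩
        exact ⟨p, hp.symm, by rw [checklist_eq_chain]; exact hc⟩
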